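-- pv_equiv track=rewrite | github.com/rahul-sg/DSC180A-Final-Project-Honda | src/utils/chunking.py | slides_to_text
-- ===== SOURCE A (Python) =====
-- from typing import List, Dict
--
-- def estimate_tokens(text: str) -> int:
--     """
--     Estimate tokens using a simple heuristic:
--     ~4 characters per token.
--
--     Safer alternative to depending on external tokenizers.
--     """
--     return max(1, int(len(text) / 4))
--
-- def chunk_slides_by_tokens(
--     slides: List[Dict],
--     max_tokens: int = 1500,
--     text_key: str = "content"
-- ) -> List[List[Dict]]:
--     """
--     Chunk slides so each chunk stays under ~max_tokens (approx).
--     Ensures LLM context safety for long lectures.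
--     """
--     chunks: List[List[Dict]] = []
--     current, cur_tok = [], 0
--
--     for s in slides:
--         t = estimate_tokens(str(s.get(text_key, "")))
--
--         # Start a new chunk if adding this slide would exceed limit
--         if current and cur_tok + t > max_tokens:
--             chunks.append(current)
--             current, cur_tok = [], 0
--
--         current.append(s)
--         cur_tok += t
--
--     if current:
--         chunks.append(current)
--
--     return chunks
--
-- def slides_to_text(
--     slides: List[Dict],
--     max_chunks: int = 3,
--     max_tokens: int = 1500
-- ) -> str:
--     """
--     Convert a slide list into a compact text block suitable for LLM context.
--     The output includes chunk & slide indices for better structure.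
--
--     Parameters:
--         slides — list of slide dictionaries
--         max_chunks — limits # of chunks passed to judge
--         max_tokens — max tokens per chunk
--
--     Returns:
--         A formatted multi-chunk text representation.
--     """
--     chunks = chunk_slides_by_tokens(slides, max_tokens=max_tokens)
--     chunks = chunks[:max_chunks]
--
--     out = []
--     for ci, ch in enumerate(chunks, 1):
--         for i, s in enumerate(ch, 1):
--             title = s.get("title", "")
--             content = s.get("content", "")
--             out.append(f"[Chunk {ci} • Slide {i}] {title}\n{content}")
--
--     return "\n\n".join(out)
-- ===== SOURCE B (Python) =====
-- def slides_to_text(slides, max_chunks=3, max_tokens=1500):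
--     # Single early-terminating pass: format each slide as it is assigned a
--     # (chunk, slide) position; stop as soon as the chunk budget is used up.
--     if max_chunks <= 0:
--         return ""
--     parts = []
--     ci, i, cur = 1, 0, 0
--     for s in slides:
--         t = max(1, int(len(str(s.get("content", ""))) / 4))
--         if i > 0 and cur + t > max_tokens:
--             if ci == max_chunks:
--                 break
--             ci, i, cur = ci + 1, 0, 0
--         i += 1
--         cur += t
--         parts.append(f"[Chunk {ci} \u2022 Slide {i}] {s.get('title','')}\n{s.get('content','')}")
--     return "\n\n".join(parts)
-- ===== Notes on version B (the rewrite author's own statement) =====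
-- stated objective: alternative
-- what changed: Replaced A's three-stage pipeline (build a list-of-lists of chunks, slice it to max_chunks, nested enumerate loop to format) with a single early-terminating pass that formats each slide as it is assigned its (chunk, slide) position and breaks as soon as the chunk budget is exhausted; Pre_ excludes negative max_chunks, a count outside the natural domain on which A's value (dropping chunks from the end) is an accident of Python list slicing, while B returns the empty string there.
-- outside the precondition, e.g. on slides_to_text([{}, {'': ''}], -1, -1): A returns '[Chunk 1 • Slide 1] \n', B returns ''
import Mathlib
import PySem

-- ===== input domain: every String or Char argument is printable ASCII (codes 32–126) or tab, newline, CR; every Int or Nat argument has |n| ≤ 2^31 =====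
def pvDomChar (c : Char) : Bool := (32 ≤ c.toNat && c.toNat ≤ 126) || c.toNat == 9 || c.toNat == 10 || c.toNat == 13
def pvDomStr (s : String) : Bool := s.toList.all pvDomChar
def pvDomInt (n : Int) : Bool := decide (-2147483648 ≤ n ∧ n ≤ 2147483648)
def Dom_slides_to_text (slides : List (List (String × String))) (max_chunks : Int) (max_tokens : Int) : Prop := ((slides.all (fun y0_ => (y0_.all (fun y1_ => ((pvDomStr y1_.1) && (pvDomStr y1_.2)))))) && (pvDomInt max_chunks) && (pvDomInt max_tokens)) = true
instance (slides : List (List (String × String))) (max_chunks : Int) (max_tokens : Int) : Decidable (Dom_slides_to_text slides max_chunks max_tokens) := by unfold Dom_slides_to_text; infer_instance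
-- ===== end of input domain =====

-- B replaces A's three-stage pipeline (chunk into a list-of-lists, slice, nested format loop)
-- by a single early-terminating formatting pass (objective: alternative decomposition, same cost).

-- ===== PORT A =====
-- shared by both ports: dict.get(k, dflt) = first match in the association list
def pvDGet (s : List (String × String)) (k dflt : String) : String :=
  match s.find? (fun p => p.1 == k) with
  | some p => p.2
  | none => dflt

-- int(len(text)/4) = floor division here, since len ≥ 0 (exact on this domain)
def estimate_tokens (text : String) : Int :=
  max 1 (PySem.Int.floordiv (PySem.Str.len text) 4)

def pvStepA (max_tokens : Int)
    (st : List (List (List (String × String))) × List (List (String × String)) × Int)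
    (s : List (String × String)) :
    List (List (List (String × String))) × List (List (String × String)) × Int :=
  let t := estimate_tokens (pvDGet s "content" "")
  if st.2.1 ≠ [] ∧ st.2.2 + t > max_tokens then
    (st.1 ++ [st.2.1], [s], t)
  else
    (st.1, st.2.1 ++ [s], st.2.2 + t)

def chunk_slides_by_tokens (slides : List (List (String × String))) (max_tokens : Int) :
    List (List (List (String × String))) :=
  let st := slides.foldl (pvStepA max_tokens) ([], [], 0)
  if st.2.1 ≠ [] then st.1 ++ [st.2.1] else st.1

-- shared formatting of one output line
def pvFmtLine (ci i : Int) (s : List (String × String)) : String :=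
  "[Chunk " ++ PySem.Int.toStr ci ++ " • Slide " ++ PySem.Int.toStr i ++ "] "
    ++ pvDGet s "title" "" ++ "\n" ++ pvDGet s "content" ""

def slides_to_text (slides : List (List (String × String))) (max_chunks : Int) (max_tokens : Int) : String :=
  let chunks := chunk_slides_by_tokens slides max_tokens
  let chunks2 := PySem.List.slice chunks none (some max_chunks)
  let out := (PySem.List.enumerate chunks2 1).foldl
      (fun acc p => (PySem.List.enumerate p.2 1).foldl
        (fun a q => a ++ [pvFmtLine p.1 q.1 q.2]) acc) []
  PySem.Str.join "\n\n" out

-- ===== PORT B =====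
-- B's loop: state (ci, i, cur, parts); breaking = returning the accumulator
def pvGoB (mc mt : Int) :
    List (List (String × String)) → Int → Int → Int → List String → List String
  | [], _, _, _, acc => acc
  | s :: rest, ci, i, cur, acc =>
    let t := max 1 (PySem.Int.floordiv (PySem.Str.len (pvDGet s "content" "")) 4)
    if i > 0 ∧ cur + t > mt then
      if ci = mc then acc
      else pvGoB mc mt rest (ci + 1) 1 t (acc ++ [pvFmtLine (ci + 1) 1 s])
    else pvGoB mc mt rest ci (i + 1) (cur + t) (acc ++ [pvFmtLine ci (i + 1) s])

def slides_to_text_alt (slides : List (List (String × String))) (max_chunks : Int) (max_tokens : Int) : String :=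
  if max_chunks ≤ 0 then ""
  else PySem.Str.join "\n\n" (pvGoB max_chunks max_tokens slides 1 0 0 [])

-- ===== PRECONDITION & SPEC =====
-- Pre_ excludes negative max_chunks, a count outside the natural domain: there A's
-- list slicing accidentally drops chunks from the end, while B returns "".
def Pre_slides_to_text (slides : List (List (String × String))) (max_chunks : Int) (max_tokens : Int) : Prop :=
  0 ≤ max_chunks
instance (slides : List (List (String × String))) (max_chunks : Int) (max_tokens : Int) : Decidable (Pre_slides_to_text slides max_chunks max_tokens) := by unfold Pre_slides_to_text; infer_instance

def pvWitness_slides_to_text : (List (List (String × String))) × Int × Int :=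
  ([[("content", "hello world"), ("title", "Intro")], [("content", "more text")]], 3, 1500)

def Spec_slides_to_text (slides : List (List (String × String))) (max_chunks : Int) (max_tokens : Int) (out : String) : Prop := out = slides_to_text_alt slides max_chunks max_tokens
instance (slides : List (List (String × String))) (max_chunks : Int) (max_tokens : Int) (out : String) : Decidable (Spec_slides_to_text slides max_chunks max_tokens out) := by unfold Spec_slides_to_text; infer_instance

-- ===== CLAIM (what is proved, stated in full; the proofs are below) =====
def Claim_equal_slides_to_text : Prop := ∀ (slides : List (List (String × String))) (max_chunks : Int) (max_tokens : Int), Dom_slides_to_text slides max_chunks max_tokens → Pre_slides_to_text slides max_chunks max_tokens → Spec_slides_to_text slides max_chunks max_tokens (slides_to_text slides max_chunks max_tokens)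

-- ===== LEMMAS AND PROOFS =====

-- labels of one chunk: (c, 1, s1), (c, 2, s2), …
def pvLabCh (c : Int) (ch : List (List (String × String))) :
    List (Int × Int × List (String × String)) :=
  (PySem.List.enumerate ch 1).map (fun q => (c, q.1, q.2))

-- labels of a list of chunks starting at chunk number s
def pvLabAll : List (List (List (String × String))) → Int → List (Int × Int × List (String × String))
  | [], _ => []
  | ch :: rest, s => pvLabCh s ch ++ pvLabAll rest (s + 1)

-- the labeling B's pass walks through, written as one recursion
def pvLabRun (mt : Int) :
    List (List (String × String)) → Int → Int → Int → List (Int × Int × List (String × String))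
  | [], _, _, _ => []
  | s :: rest, ci, i, cur =>
    let t := estimate_tokens (pvDGet s "content" "")
    if i > 0 ∧ cur + t > mt then (ci + 1, 1, s) :: pvLabRun mt rest (ci + 1) 1 t
    else (ci, i + 1, s) :: pvLabRun mt rest ci (i + 1) (cur + t)

theorem pvLabCh_nil (c : Int) : pvLabCh c ([] : List (List (String × String))) = [] := by
  simp [pvLabCh, PySem.List.enumerate_nil]

theorem pvLabCh_snoc (c : Int) (ch : List (List (String × String))) (x) :
    pvLabCh c (ch ++ [x]) = pvLabCh c ch ++ [(c, 1 + (ch.length : Int), x)] := by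
  simp [pvLabCh, PySem.List.enumerate_append, PySem.List.enumerate_cons,
    PySem.List.enumerate_nil]

theorem pvLabAll_snoc (chs : List (List (List (String × String)))) (c) (s : Int) :
    pvLabAll (chs ++ [c]) s = pvLabAll chs s ++ pvLabCh (s + chs.length) c := by
  induction chs generalizing s with
  | nil => simp [pvLabAll]
  | cons ch rest ih =>
    simp only [List.cons_append, pvLabAll, ih, List.append_assoc, List.length_cons,
      Nat.cast_add, Nat.cast_one]
    have h : s + 1 + (rest.length : Int) = s + ((rest.length : Int) + 1) := by ring
    rw [h]

-- chunk numbers produced by the pass never drop below the starting one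
theorem pvLabRun_mono (mt : Int) (l : List (List (String × String))) :
    ∀ (ci i cur : Int) (e : Int × Int × List (String × String)),
      e ∈ pvLabRun mt l ci i cur → ci ≤ e.1 := by
  induction l with
  | nil => intro ci i cur e h; simp [pvLabRun] at h
  | cons s rest ih =>
    intro ci i cur e h
    simp only [pvLabRun] at h
    split at h
    · rcases List.mem_cons.mp h with h1 | h1
      · subst h1; omega
      · have := ih (ci + 1) 1 (estimate_tokens (pvDGet s "content" "")) e h1; omega
    · rcases List.mem_cons.mp h with h1 | h1
      · subst h1; omega
      · exact ih ci (i + 1) (cur + estimate_tokens (pvDGet s "content" "")) e h1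

-- B's pass = format the labels whose chunk number fits the budget
theorem pvGoB_eq_filter (mc mt : Int) (l : List (List (String × String))) :
    ∀ (ci i cur : Int) (acc : List String), ci ≤ mc →
      pvGoB mc mt l ci i cur acc
        = acc ++ ((pvLabRun mt l ci i cur).filter (fun e => decide (e.1 ≤ mc))).map
            (fun e => pvFmtLine e.1 e.2.1 e.2.2) := by
  induction l with
  | nil => intro ci i cur acc h; simp [pvGoB, pvLabRun]
  | cons s rest ih =>
    intro ci i cur acc h
    have ht : max 1 (PySem.Int.floordiv (PySem.Str.len (pvDGet s "content" "")) 4)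
        = estimate_tokens (pvDGet s "content" "") := rfl
    simp only [pvGoB, pvLabRun, ht]
    by_cases hg : i > 0 ∧ cur + estimate_tokens (pvDGet s "content" "") > mt
    · rw [if_pos hg, if_pos hg]
      by_cases hci : ci = mc
      · rw [if_pos hci]
        have hfil : ((ci + 1, (1:Int), s) :: pvLabRun mt rest (ci + 1) 1
              (estimate_tokens (pvDGet s "content" ""))).filter
              (fun e => decide (e.1 ≤ mc)) = [] := by
          rw [List.filter_eq_nil_iff]
          intro e he
          rcases List.mem_cons.mp he with h1 | h1
          · subst h1; simp; omega
          · have := pvLabRun_mono mt rest (ci + 1) 1 _ e h1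
            simp; omega
        rw [hfil]; simp
      · rw [if_neg hci]
        have h1 : ci + 1 ≤ mc := by omega
        rw [ih (ci + 1) 1 (estimate_tokens (pvDGet s "content" "")) _ h1]
        rw [List.filter_cons_of_pos (by simp; omega)]
        simp [List.append_assoc]
    · rw [if_neg hg, if_neg hg]
      rw [ih ci (i + 1) (cur + estimate_tokens (pvDGet s "content" "")) _ h]
      rw [List.filter_cons_of_pos (by simp; omega)]
      simp [List.append_assoc]

-- the labels of B's pass are exactly the labels of A's chunking
theorem pv_loop (mt : Int) (slides : List (List (String × String))) :
    ∀ (chunks : List (List (List (String × String)))) (current : List (List (String × String))) (cur : Int),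
      pvLabAll chunks 1 ++ pvLabCh ((chunks.length : Int) + 1) current
        ++ pvLabRun mt slides ((chunks.length : Int) + 1) (current.length : Int) cur
      = (fun st => pvLabAll st.1 1 ++ pvLabCh ((st.1.length : Int) + 1) st.2.1)
          (slides.foldl (pvStepA mt) (chunks, current, cur)) := by
  induction slides with
  | nil => intro chunks current cur; simp [pvLabRun]
  | cons s rest ih =>
    intro chunks current cur
    simp only [List.foldl_cons, pvLabRun]
    by_cases hc : current = []
    · subst hc
      have hg : ¬ (((0:Int) > 0) ∧ cur + estimate_tokens (pvDGet s "content" "") > mt) := by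
        intro h; omega
      simp only [pvStepA, List.length_nil, Nat.cast_zero]
      rw [if_neg hg, if_neg (fun h => (h.1 rfl))]
      have := ih chunks [s] (cur + estimate_tokens (pvDGet s "content" ""))
      simp only [List.length_cons, List.length_nil, Nat.cast_one, Nat.cast_zero] at this
      simpa [pvLabCh, PySem.List.enumerate_cons, PySem.List.enumerate_nil] using this
    · have hlen : (0:Int) < (current.length : Int) := by
        have : 0 < current.length := List.length_pos_iff.mpr hc
        exact_mod_cast this
      by_cases hg : cur + estimate_tokens (pvDGet s "content" "") > mt
      · simp only [pvStepA]
        rw [if_pos ⟨hlen, hg⟩, if_pos ⟨hc, hg⟩]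
        have := ih (chunks ++ [current]) [s] (estimate_tokens (pvDGet s "content" ""))
        simp only [List.length_append, List.length_cons, List.length_nil, Nat.cast_add,
          Nat.cast_one, Nat.cast_zero, pvLabAll_snoc] at this ⊢
        have harr : (1 : Int) + (chunks.length : Int) = (chunks.length : Int) + 1 := by ring
        rw [harr] at this
        simpa [pvLabCh, PySem.List.enumerate_cons, PySem.List.enumerate_nil,
          List.append_assoc] using this
      · simp only [pvStepA]
        rw [if_neg (by intro h; exact hg h.2), if_neg (by intro h; exact hg h.2)]
        have := ih chunks (current ++ [s]) (cur + estimate_tokens (pvDGet s "content" ""))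
        simp only [List.length_append, List.length_cons, List.length_nil, Nat.cast_add,
          Nat.cast_one, pvLabCh_snoc, List.append_assoc] at this ⊢
        ring_nf at this ⊢
        exact this

-- filtering the labeled list by chunk number = taking a prefix of the chunks
theorem pv_filter (chs : List (List (List (String × String)))) :
    ∀ (s m : Int),
      (pvLabAll chs s).filter (fun e => decide (e.1 ≤ m))
        = pvLabAll (chs.take (m - s + 1).toNat) s := by
  induction chs with
  | nil => intro s m; simp [pvLabAll]
  | cons ch rest ih =>
    intro s m
    by_cases h : s ≤ m
    · have h1 : (m - s + 1).toNat = (m - (s + 1) + 1).toNat + 1 := by omega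
      simp only [pvLabAll, List.filter_append, ih, h1, List.take_succ_cons, pvLabAll]
      congr 1
      simp [pvLabCh, List.filter_map, Function.comp_def, h]
    · have h1 : (m - s + 1).toNat = 0 := by omega
      have h2 : (m - (s + 1) + 1).toNat = 0 := by omega
      simp only [pvLabAll, List.filter_append, ih, h1, h2, List.take_zero, pvLabAll]
      simp [pvLabCh, List.filter_map, Function.comp_def, h]

-- A's nested formatting loop, characterised on the labeled list
theorem pv_out (chs : List (List (List (String × String)))) :
    ∀ (s : Int) (acc : List String),
      (PySem.List.enumerate chs s).foldl
        (fun acc p => (PySem.List.enumerate p.2 1).foldl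
          (fun a q => a ++ [pvFmtLine p.1 q.1 q.2]) acc) acc
      = acc ++ (pvLabAll chs s).map (fun e => pvFmtLine e.1 e.2.1 e.2.2) := by
  induction chs with
  | nil => intro s acc; simp [pvLabAll, PySem.List.enumerate_nil]
  | cons ch rest ih =>
    intro s acc
    rw [PySem.List.enumerate_cons, List.foldl_cons,
      PySem.List.foldl_append_singleton_eq_map, ih]
    simp [pvLabAll, pvLabCh, List.map_map, Function.comp_def, List.append_assoc]

-- ===== VERDICT (by name: the statement is the Claim_ definition above) =====
theorem slides_to_text_spec : Claim_equal_slides_to_text := by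
  intro slides mc mt _ hpre
  unfold Spec_slides_to_text slides_to_text_alt
  have hpre' : (0:Int) ≤ mc := hpre
  by_cases hmc0 : mc ≤ 0
  · -- mc = 0: A slices to the empty chunk list, B emits nothing
    have h0 : mc = 0 := le_antisymm hmc0 hpre'
    rw [if_pos hmc0]
    subst h0
    simp only [slides_to_text]
    rw [PySem.List.slice_to _ (le_refl 0)]
    simp [PySem.List.enumerate_nil, PySem.Str.join]
  · rw [if_neg hmc0]
    have hmc1 : (1:Int) ≤ mc := by omega
    cases slides with
    | nil =>
      simp [slides_to_text, chunk_slides_by_tokens, pvGoB,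
        PySem.List.slice, PySem.List.enumerate_nil, PySem.Str.join]
    | cons s0 rest =>
      simp only [slides_to_text, chunk_slides_by_tokens]
      set stA := (s0 :: rest).foldl (pvStepA mt) ([], [], 0) with hstA
      have hinit := pv_loop mt (s0 :: rest) [] [] 0
      simp only [pvLabAll, pvLabCh_nil, List.length_nil, Nat.cast_zero, zero_add,
        List.nil_append, List.append_nil] at hinit
      rw [← hstA] at hinit
      -- after at least one slide the current chunk is nonempty
      have hcur : stA.2.1 ≠ [] := by
        have step1 : ∀ st s, (pvStepA mt st s).2.1 ≠ [] := by
          intro st s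
          unfold pvStepA
          dsimp only
          split <;> simp
        have rec1 : ∀ (l : List (List (String × String))) st, st.2.1 ≠ [] →
            (l.foldl (pvStepA mt) st).2.1 ≠ [] := by
          intro l
          induction l with
          | nil => intro st h; exact h
          | cons x xs ih => intro st _; exact ih _ (step1 st x)
        rw [hstA, List.foldl_cons]
        exact rec1 rest _ (step1 ([], [], 0) s0)
      have hlab : pvLabAll stA.1 1 ++ pvLabCh ((stA.1.length : Int) + 1) stA.2.1
          = pvLabAll (stA.1 ++ [stA.2.1]) 1 := by
        rw [pvLabAll_snoc]; ring_nf
      rw [if_pos hcur]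
      rw [pvGoB_eq_filter mc mt _ 1 0 0 [] hmc1, hinit, hlab, pv_filter]
      rw [pv_out _ 1 [], List.nil_append, List.nil_append]
      rw [PySem.List.slice_to _ hpre']
      have harg : (mc - 1 + 1).toNat = mc.toNat := by omega
      rw [harg]
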